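-- pv_equiv track=rewrite | github.com/sandialabs/conin | conin/oracle_constraints.py | always_appears_before
-- ===== SOURCE A (Python) =====
-- def always_appears_before(seq, val1, val2):
--     """
--     Require that all instances of val1 appear before any instances of val2
--
--     Parameters:
--         seq (iterable): The sequence to be checked.
--         val1: val1 appears before val2
--         val2: val2 appears after val1
--
--     Returns:
--         bool: True iff satisfied
--     """
--     for index, x1 in enumerate(seq):
--         if x1 == val2:
--             for index2 in range(index + 1, len(seq)):
--                 if seq[index2] == val1:
--                     return False
--             return True
--     return True
-- ===== SOURCE B (Python) =====
-- def always_appears_before(seq, val1, val2):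
--     """Single forward pass: flag once val2 has been seen; fail if val1 follows it."""
--     seen_val2 = False
--     for x in seq:
--         if x == val1 and seen_val2:
--             return False
--         if x == val2:
--             seen_val2 = True
--     return True
-- ===== Notes on version B (the rewrite author's own statement) =====
-- stated objective: simpler
-- what changed: Replaced A's find-first-val2-then-index-scan-the-tail nested structure with one flat pass carrying a seen_val2 boolean, with no indexing or len() call.
import Mathlib
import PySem

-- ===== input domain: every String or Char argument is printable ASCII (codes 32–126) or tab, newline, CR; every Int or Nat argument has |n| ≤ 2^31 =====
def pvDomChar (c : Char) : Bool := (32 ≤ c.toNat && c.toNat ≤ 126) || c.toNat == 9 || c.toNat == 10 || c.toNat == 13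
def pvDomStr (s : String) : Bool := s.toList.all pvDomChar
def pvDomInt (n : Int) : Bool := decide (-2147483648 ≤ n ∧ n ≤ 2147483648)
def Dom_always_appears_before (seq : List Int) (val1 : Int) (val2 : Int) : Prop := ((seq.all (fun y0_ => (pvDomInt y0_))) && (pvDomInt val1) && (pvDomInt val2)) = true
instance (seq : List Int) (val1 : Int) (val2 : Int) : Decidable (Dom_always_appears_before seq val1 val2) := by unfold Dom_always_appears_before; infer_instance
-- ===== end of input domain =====

-- B replaces A's find-first-val2-then-index-scan-the-tail nested structure with one
-- flat state-carrying pass (a seen_val2 flag), objective: simpler.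

-- ===== PORT A =====
-- inner loop: 'for index2 in range(index + 1, len(seq)): if seq[index2] == val1: return False / return True'
def abInner (seq : List Int) (val1 : Int) : List Int → Bool
  | [] => true
  | i :: rest =>
    if PySem.List.pyGet? seq i = some val1 then false else abInner seq val1 rest

-- outer loop: 'for index, x1 in enumerate(seq)' as structural recursion over the
-- remaining suffix carrying the enumerate index
def abOuter (seq : List Int) (val1 val2 : Int) (index : Int) : List Int → Bool
  | [] => true
  | x1 :: rest =>
    if x1 = val2 then
      abInner seq val1 (PySem.List.pyRange (index + 1) seq.length 1)
    else abOuter seq val1 val2 (index + 1) rest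

def always_appears_before (seq : List Int) (val1 : Int) (val2 : Int) : Bool :=
  abOuter seq val1 val2 0 seq

-- ===== PORT B =====
-- 'seen_val2 = False; for x in seq: if x == val1 and seen_val2: return False;
--  if x == val2: seen_val2 = True / return True'
def abAltGo (val1 val2 : Int) (seen : Bool) : List Int → Bool
  | [] => true
  | x :: rest =>
    if x = val1 ∧ seen = true then false
    else abAltGo val1 val2 (if x = val2 then true else seen) rest

def always_appears_before_alt (seq : List Int) (val1 : Int) (val2 : Int) : Bool :=
  abAltGo val1 val2 false seq

-- ===== PRECONDITION & SPEC =====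
def Spec_always_appears_before (seq : List Int) (val1 : Int) (val2 : Int) (out : Bool) : Prop := out = always_appears_before_alt seq val1 val2
instance (seq : List Int) (val1 : Int) (val2 : Int) (out : Bool) : Decidable (Spec_always_appears_before seq val1 val2 out) := by unfold Spec_always_appears_before; infer_instance

-- ===== CLAIM (what is proved, stated in full; the proofs are below) =====
def Claim_equal_always_appears_before : Prop := ∀ (seq : List Int) (val1 : Int) (val2 : Int), Dom_always_appears_before seq val1 val2 → Spec_always_appears_before seq val1 val2 (always_appears_before seq val1 val2)

-- ===== LEMMAS AND PROOFS =====

-- reference: on the remaining suffix, find the first val2 and require no val1 after it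
def abRef (val1 val2 : Int) : List Int → Bool
  | [] => true
  | x :: rest => if x = val2 then rest.all (fun v => v ≠ val1) else abRef val1 val2 rest

-- A's inner index loop over range(k, len seq) scans exactly the suffix seq.drop k
theorem abInner_eq_drop (seq : List Int) (val1 : Int) (k : Int) (hk : 0 ≤ k) :
    abInner seq val1 (PySem.List.pyRange k seq.length 1)
      = (seq.drop k.toNat).all (fun v => decide (v ≠ val1)) := by
  by_cases h : k < (seq.length : Int)
  · rw [PySem.List.pyRange_one_cons h]
    have hlt : k.toNat < seq.length := by omega
    have hdrop : seq.drop k.toNat = seq[k.toNat] :: seq.drop (k.toNat + 1) :=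
      List.drop_eq_getElem_cons hlt
    have hget : PySem.List.pyGet? seq k = some seq[k.toNat] := by
      exact PySem.List.pyGet?_eq_some_getElem seq hk (by omega)
    have ih := abInner_eq_drop seq val1 (k + 1) (by omega)
    simp only [abInner, hget, hdrop, List.all_cons]
    have : (k + 1).toNat = k.toNat + 1 := by omega
    rw [this] at ih
    by_cases hv : seq[k.toNat] = val1 <;> simp [hv, ih]
  · rw [PySem.List.pyRange_one_eq_nil (by omega)]
    rw [List.drop_eq_nil_of_le (by omega)]
    rfl
termination_by (seq.length - k.toNat : Nat)
decreasing_by omega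

-- A's outer loop on the suffix seq.drop index.toNat computes abRef of that suffix
theorem abOuter_eq_ref (seq : List Int) (val1 val2 : Int) (index : Int)
    (rem : List Int) (hi : 0 ≤ index) (hrem : rem = seq.drop index.toNat) :
    abOuter seq val1 val2 index rem = abRef val1 val2 rem := by
  induction rem generalizing index with
  | nil => rfl
  | cons x rest ih =>
    have hlt : index.toNat < seq.length := by
      by_contra h
      rw [List.drop_eq_nil_of_le (by omega)] at hrem
      exact (List.cons_ne_nil x rest) hrem
    have hdrop : seq.drop index.toNat = seq[index.toNat] :: seq.drop (index.toNat + 1) :=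
      List.drop_eq_getElem_cons hlt
    rw [hdrop] at hrem
    obtain ⟨hx, hrest⟩ : x = seq[index.toNat] ∧ rest = seq.drop (index.toNat + 1) := by
      exact ⟨(List.cons.injEq ..).mp hrem.symm |>.1.symm, (List.cons.injEq ..).mp hrem.symm |>.2.symm⟩
    simp only [abOuter, abRef]
    by_cases hv : x = val2
    · simp only [hv]
      rw [abInner_eq_drop seq val1 (index + 1) (by omega)]
      have : (index + 1).toNat = index.toNat + 1 := by omega
      rw [this, ← hrest]
      simp
    · simp only [if_neg hv]
      exact ih (index + 1) (by omega) (by rw [hrest]; congr 1; omega)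

-- B with the flag already set just checks that no val1 remains
theorem abAltGo_true (val1 val2 : Int) (l : List Int) :
    abAltGo val1 val2 true l = l.all (fun v => decide (v ≠ val1)) := by
  induction l with
  | nil => rfl
  | cons x rest ih =>
    by_cases hv : x = val1 <;> simp [abAltGo, hv, ih]

-- B with the flag clear computes abRef
theorem abAltGo_false (val1 val2 : Int) (l : List Int) :
    abAltGo val1 val2 false l = abRef val1 val2 l := by
  induction l with
  | nil => rfl
  | cons x rest ih =>
    simp only [abAltGo, abRef]
    by_cases hv : x = val2
    · simp [hv, abAltGo_true]
    · simp [hv, ih]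

-- ===== VERDICT (by name: the statement is the Claim_ definition above) =====
theorem always_appears_before_spec : Claim_equal_always_appears_before := by
  intro seq val1 val2 _
  unfold Spec_always_appears_before always_appears_before always_appears_before_alt
  rw [abOuter_eq_ref seq val1 val2 0 seq le_rfl (by simp), abAltGo_false]
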